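-- pv_equiv track=rewrite | github.com/eckre/ECKRE | data_loader.py | _preprocess_example
-- ===== SOURCE A (Python) =====
-- def _preprocess_example(text_a):
--     for i,text in enumerate(text_a):
--         flag = True
--         if len(text) >= 5:
--             length_text = len(text) - 1
--             index = 0
--             while (index < length_text - 1):
--                 if text[index] != text[index + 1]:
--                     flag=False
--                     break
--                 else:
--                     index += 1
--             if flag:
--                 text_a[i] = text[0:3]
--     return text_a
-- ===== SOURCE B (Python) =====
-- def _preprocess_example(text_a):
--     # Pass 1: collect the edits. A string's leading chars (all but the last) are
--     # all identical iff the string equals its own shift on that region: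
--     # t[:-2] == t[1:-1]  (no character scan, no flag).
--     edits = [(i, t[:3]) for i, t in enumerate(text_a)
--              if len(t) >= 5 and t[:-2] == t[1:-1]]
--     # Pass 2: apply the edits in place (same mutation as A).
--     for i, s in edits:
--         text_a[i] = s
--     return text_a
-- ===== Notes on version B (the rewrite author's own statement) =====
-- stated objective: alternative
-- what changed: A's single in-place pass with an index/flag while-scan over adjacent characters is replaced by two staged passes: first collect (index, truncation) edits selected by a self-shift slice comparison t[:-2] == t[1:-1] (no per-character loop, no flag), then apply the edits in place.
import Mathlib
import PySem

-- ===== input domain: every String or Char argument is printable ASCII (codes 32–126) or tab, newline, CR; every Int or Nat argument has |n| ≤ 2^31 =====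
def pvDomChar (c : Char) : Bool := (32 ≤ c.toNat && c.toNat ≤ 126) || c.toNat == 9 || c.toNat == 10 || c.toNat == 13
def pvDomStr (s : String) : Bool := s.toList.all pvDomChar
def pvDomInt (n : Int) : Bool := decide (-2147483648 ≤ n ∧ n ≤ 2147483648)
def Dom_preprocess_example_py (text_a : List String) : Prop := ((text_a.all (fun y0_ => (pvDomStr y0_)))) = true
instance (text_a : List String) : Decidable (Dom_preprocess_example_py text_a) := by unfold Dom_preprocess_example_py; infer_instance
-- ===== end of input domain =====

-- B replaces A's single in-place pass with an index/flag while-scan by two staged passes: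
-- collect (index, truncation) edits via a self-shift slice comparison t[:-2] == t[1:-1], then apply them.
-- Equivalence is about the RETURN value only (both Pythons mutate text_a in place).

-- ===== PORT A =====
-- the inner 'while (index < length_text - 1): …' of A, returning the flag
def pvA_while (text : String) (length_text : Int) (index : Int) : Bool :=
  if index < length_text - 1 then
    if PySem.Str.pyGet? text index != PySem.Str.pyGet? text (index + 1) then false
    else pvA_while text length_text (index + 1)
  else true
termination_by (length_text - index).toNat
decreasing_by omega

-- the body of A's 'for i,text in enumerate(text_a)' loop
def pvA_step (acc : List String) (p : Int × String) : List String :=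
  if PySem.Str.len p.2 ≥ 5 then
    let length_text := PySem.Str.len p.2 - 1
    if pvA_while p.2 length_text 0 then
      PySem.List.pySetD acc p.1 (PySem.Str.slice p.2 (some 0) (some 3))
    else acc
  else acc

def preprocess_example_py (text_a : List String) : List String :=
  (PySem.List.enumerate text_a).foldl pvA_step text_a

-- ===== PORT B =====
-- B's selection test: len(t) >= 5 and t[:-2] == t[1:-1]
def pvB_cond (t : String) : Bool :=
  PySem.Str.len t ≥ 5 &&
    PySem.Str.slice t none (some (-2)) == PySem.Str.slice t (some 1) (some (-1))

-- pass 1: edits = [(i, t[:3]) for i, t in enumerate(text_a) if <cond>]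
def pvB_edits (text_a : List String) : List (Int × String) :=
  ((PySem.List.enumerate text_a).filter (fun p => pvB_cond p.2)).map
    (fun p => (p.1, PySem.Str.slice p.2 none (some 3)))

-- pass 2: for i, s in edits: text_a[i] = s
def preprocess_example_py_alt (text_a : List String) : List String :=
  (pvB_edits text_a).foldl (fun acc p => PySem.List.pySetD acc p.1 p.2) text_a

-- ===== PRECONDITION & SPEC =====
def Spec_preprocess_example_py (text_a : List String) (out : List String) : Prop := out = preprocess_example_py_alt text_a
instance (text_a : List String) (out : List String) : Decidable (Spec_preprocess_example_py text_a out) := by unfold Spec_preprocess_example_py; infer_instance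

-- ===== CLAIM (what is proved, stated in full; the proofs are below) =====
def Claim_equal_preprocess_example_py : Prop := ∀ (text_a : List String), Dom_preprocess_example_py text_a → Spec_preprocess_example_py text_a (preprocess_example_py text_a)

-- ===== LEMMAS AND PROOFS =====

-- proof-side per-element result both programs compute
def pvElem (t : String) : String :=
  if pvB_cond t then PySem.Str.slice t none (some 3) else t

-- A's while-scan is true iff all adjacent pairs of indices below length_text - 1 agree
lemma pvA_while_iff (t : String) (L : Int) (i : Int) :
    pvA_while t L i = true ↔
      ∀ k : Int, i ≤ k → k < L - 1 → PySem.Str.pyGet? t k = PySem.Str.pyGet? t (k + 1) := by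
  fun_induction pvA_while t L i with
  | case1 i hlt hne =>
    constructor
    · intro h; exact absurd h (by simp)
    · intro h
      exact absurd (h i le_rfl hlt) (bne_iff_ne.mp hne)
  | case2 i hlt hne ih =>
    rw [ih]
    constructor
    · intro h k hik hk
      rcases eq_or_lt_of_le hik with rfl | hlt2
      · simpa [bne] using hne
      · exact h k (by omega) hk
    · intro h k hik hk
      exact h k (by omega) hk
  | case3 i hge =>
    simp only [true_iff]
    intro k h1 h2
    omega

-- A's while-scan, restated over Nat indices and getD
lemma while_cond_nat (t : String) :
    pvA_while t ((t.toList.length : Int) - 1) 0 = true ↔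
      ∀ k : Nat, k + 3 ≤ t.toList.length → t.toList.getD k ' ' = t.toList.getD (k + 1) ' ' := by
  rw [pvA_while_iff]
  constructor
  · intro h k hk
    have hke := h (k : Int) (by positivity) (by omega)
    have h2 : ((k : Int) + 1) = ((k + 1 : Nat) : Int) := by push_cast; ring
    rw [PySem.Str.pyGet?_natCast, h2, PySem.Str.pyGet?_natCast] at hke
    rw [List.getD_eq_getElem?_getD, List.getD_eq_getElem?_getD, hke]
  · intro h k hk0 hk2
    obtain ⟨m, rfl⟩ := Int.eq_ofNat_of_zero_le hk0
    have hm : m + 3 ≤ t.toList.length := by omega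
    have h2 : ((m : Int) + 1) = ((m + 1 : Nat) : Int) := by push_cast; ring
    rw [PySem.Str.pyGet?_natCast, h2, PySem.Str.pyGet?_natCast,
      List.getElem?_eq_getElem (by omega), List.getElem?_eq_getElem (by omega)]
    exact congrArg some (by rw [List.getElem_eq_getD, List.getElem_eq_getD]; exact h m hm)

-- the self-shift comparison over a list: take (n-2) = (drop 1).take (n-2) iff adjacent pairs agree
lemma shift_iff_adj (l : List Char) (h5 : 5 ≤ l.length) :
    l.take (l.length - 2) = (l.drop 1).take (l.length - 2) ↔
      ∀ k : Nat, k + 3 ≤ l.length → l.getD k ' ' = l.getD (k + 1) ' ' := by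
  constructor
  · intro h k hk
    have hk2 : k < l.length - 2 := by omega
    have h1 := congrArg (fun xs => xs.getD k ' ') h
    simp only [List.getD_eq_getElem?_getD, List.getElem?_take, List.getElem?_drop] at h1 ⊢
    simpa [hk2, Nat.add_comm 1 k] using h1
  · intro h
    apply List.ext_getElem
    · simp; omega
    · intro k hk1 hk2
      have hk : k < l.length - 2 := by
        simpa using hk1
      have := h k (by omega)
      simp only [List.getElem_take, List.getElem_drop]
      simp only [List.getD_eq_getElem?_getD] at this
      rw [List.getElem?_eq_getElem (by omega), List.getElem?_eq_getElem (by omega)] at this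
      simpa [Nat.add_comm 1 k] using this

-- the two per-element conditions agree for strings of length ≥ 5
lemma cond_iff (t : String) (h5 : 5 ≤ t.toList.length) :
    pvA_while t (PySem.Str.len t - 1) 0 = true ↔ pvB_cond t = true := by
  have hlen : PySem.Str.len t = (t.toList.length : Int) := PySem.Str.len_eq t
  have hslice1 : (PySem.Str.slice t none (some (-2))).toList = t.toList.take (t.toList.length - 2) := by
    rw [PySem.Str.toList_slice, PySem.Chars.slice_eq_listSlice,
      PySem.List.slice_to_neg_ofNat _ 2 (by omega)]
  have hslice2 : (PySem.Str.slice t (some 1) (some (-1))).toList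
      = (t.toList.drop 1).take (t.toList.length - 2) := by
    have key : ∀ (l : List Char), 5 ≤ l.length →
        PySem.List.slice l (some 1) (some (-1)) = (l.drop 1).take (l.length - 2) := by
      intro l hl5
      have hne : l ≠ [] := by
        intro h
        rw [h] at hl5
        simp at hl5
      simp [PySem.List.slice, PySem.List.clampIdx, hne]
      rw [Nat.min_eq_left (by omega), List.drop_one]
      congr 1
      omega
    rw [PySem.Str.toList_slice, PySem.Chars.slice_eq_listSlice, key _ h5]
  have hstr : (PySem.Str.slice t none (some (-2)) == PySem.Str.slice t (some 1) (some (-1))) = true ↔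
      t.toList.take (t.toList.length - 2) = (t.toList.drop 1).take (t.toList.length - 2) := by
    rw [beq_iff_eq, ← hslice1, ← hslice2]
    exact ⟨fun h => h ▸ rfl, fun h => String.toList_inj.mp h⟩
  have h5' : (decide (PySem.Str.len t ≥ 5)) = true := by
    rw [hlen]
    simp only [ge_iff_le, decide_eq_true_eq]
    exact_mod_cast h5
  rw [hlen, while_cond_nat, pvB_cond, Bool.and_eq_true, hstr, ← shift_iff_adj _ h5]
  constructor
  · intro h; exact ⟨h5', h⟩
  · intro h; exact h.2

-- list surgery: setting at the length of the prefix replaces the head of the suffix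
lemma set_at_length : ∀ (pre : List String) (t v : String) (rest : List String),
    (pre ++ t :: rest).set pre.length v = pre ++ v :: rest
  | [], _, _, _ => rfl
  | p :: pre, t, v, rest => by
      simp [set_at_length pre t v rest]

-- one iteration of A's for-loop performs the per-element transformation in place
lemma pvA_step_eq (pre rest : List String) (t : String) :
    pvA_step (pre ++ t :: rest) ((pre.length : Int), t) = pre ++ pvElem t :: rest := by
  unfold pvA_step pvElem
  by_cases h5 : 5 ≤ t.toList.length
  · have hlen5 : PySem.Str.len t ≥ 5 := by rw [PySem.Str.len_eq]; exact_mod_cast h5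
    rw [if_pos hlen5]
    by_cases hw : pvA_while t (PySem.Str.len t - 1) 0 = true
    · rw [if_pos hw, if_pos ((cond_iff t h5).mp hw), PySem.List.pySetD_natCast, set_at_length]
      have : PySem.Str.slice t (some 0) (some 3) = PySem.Str.slice t none (some 3) := rfl
      rw [this]
    · rw [if_neg hw, if_neg (fun hc => hw ((cond_iff t h5).mpr hc))]
  · have hlen5 : ¬ PySem.Str.len t ≥ 5 := by rw [PySem.Str.len_eq]; omega
    have hcond : pvB_cond t ≠ true := by
      intro hc
      unfold pvB_cond at hc
      exact hlen5 (by simpa using ((Bool.and_eq_true _ _).mp hc).1)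
    rw [if_neg hlen5, if_neg hcond]

-- A's whole for-loop, run from any prefix already processed, maps the transformation
lemma pvA_fold_eq (rest : List String) : ∀ (pre : List String),
    (PySem.List.enumerate rest (pre.length : Int)).foldl pvA_step (pre ++ rest)
      = pre ++ rest.map pvElem := by
  induction rest with
  | nil => intro pre; simp [PySem.List.enumerate]
  | cons t rest ih =>
    intro pre
    rw [PySem.List.enumerate_cons, List.foldl_cons, pvA_step_eq]
    have := ih (pre ++ [pvElem t])
    simp only [List.length_append, List.length_cons, List.length_nil] at this
    push_cast at this
    simpa [List.append_assoc] using this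

-- B's apply-pass over the edits of a suffix performs the same map
lemma pvB_fold_eq (rest : List String) : ∀ (pre : List String),
    (((PySem.List.enumerate rest (pre.length : Int)).filter (fun p => pvB_cond p.2)).map
        (fun p => (p.1, PySem.Str.slice p.2 none (some 3)))).foldl
      (fun acc p => PySem.List.pySetD acc p.1 p.2) (pre ++ rest)
      = pre ++ rest.map pvElem := by
  induction rest with
  | nil => intro pre; simp [PySem.List.enumerate]
  | cons t rest ih =>
    intro pre
    rw [PySem.List.enumerate_cons]
    have harith : ((pre.length : Int) + 1) = (((pre ++ [pvElem t]).length : Nat) : Int) := by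
      simp
    by_cases hc : pvB_cond t = true
    · rw [List.filter_cons]
      simp only [hc, if_true]
      rw [List.map_cons, List.foldl_cons, PySem.List.pySetD_natCast, set_at_length]
      have := ih (pre ++ [pvElem t])
      rw [← harith] at this
      simp only [List.append_assoc, List.singleton_append] at this
      simpa [pvElem, hc] using this
    · rw [List.filter_cons]
      simp only [hc, if_false, Bool.false_eq_true]
      have := ih (pre ++ [pvElem t])
      rw [← harith] at this
      simp only [List.append_assoc, List.singleton_append] at this
      simpa [pvElem, hc] using this

-- ===== VERDICT (by name: the statement is the Claim_ definition above) =====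
theorem preprocess_example_py_spec : Claim_equal_preprocess_example_py := by
  intro text_a _
  unfold Spec_preprocess_example_py preprocess_example_py preprocess_example_py_alt pvB_edits
  have hA := pvA_fold_eq text_a []
  have hB := pvB_fold_eq text_a []
  simp only [List.length_nil, Nat.cast_zero, List.nil_append] at hA hB
  rw [hA, hB]
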